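-- pv_equiv track=rewrite | github.com/KEDIARAHUL135/ReadOMR | src/altToCornerCircles.py | FilterRectCoordinates
-- ===== SOURCE A (Python) =====
-- def FilterRectCoordinates(RectCoordinates):
--     DeleteElementIndex = []
--
--     for i in range(1, len(RectCoordinates)):
--         # Sum1 & Sum2 contain the sum of all the elements of both the coordinates
--         # of a consecutive rectangles.
--         Sum1 = 0
--         Sum2 = 0
--         for j in RectCoordinates[i-1]:
--             Sum1 = Sum1 + j
--         for j in RectCoordinates[i]:
--             Sum2 = Sum2 + j
--
--         Difference = Sum1 - Sum2
--
--         # Rectangles are considered same if Difference is between -5 to +5.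
--         # This threshold is to be modified
--         if -10 <= Difference <= 10:
--             DeleteElementIndex.append(i-1)
--
--     # List is reversed so that while deleting elements, they are deleted from last.
--     DeleteElementIndex.reverse()
--
--     # Deleting elements
--     for i in DeleteElementIndex:
--         del RectCoordinates[i]
--
--     return RectCoordinates
-- ===== SOURCE B (Python) =====
-- def FilterRectCoordinates(RectCoordinates):
--     # One right-to-left pass: keep a rectangle unless its coordinate sum is
--     # within 10 of the sum of the rectangle that follows it in the original list.
--     kept = []
--     next_sum = None
--     for rect in reversed(RectCoordinates):
--         s = sum(rect)
--         if next_sum is None or not (-10 <= s - next_sum <= 10):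
--             kept.append(rect)
--         next_sum = s
--     kept.reverse()
--     RectCoordinates[:] = kept
--     return RectCoordinates
-- ===== Notes on version B (the rewrite author's own statement) =====
-- stated objective: simpler
-- what changed: Replaces A's three-phase scheme (collect delete-indices via nested summing loops, reverse the index list, delete by index from the end) with a single right-to-left pass that carries the sum of the following rectangle and keeps a rectangle directly, building the result without any index bookkeeping.
import Mathlib
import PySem

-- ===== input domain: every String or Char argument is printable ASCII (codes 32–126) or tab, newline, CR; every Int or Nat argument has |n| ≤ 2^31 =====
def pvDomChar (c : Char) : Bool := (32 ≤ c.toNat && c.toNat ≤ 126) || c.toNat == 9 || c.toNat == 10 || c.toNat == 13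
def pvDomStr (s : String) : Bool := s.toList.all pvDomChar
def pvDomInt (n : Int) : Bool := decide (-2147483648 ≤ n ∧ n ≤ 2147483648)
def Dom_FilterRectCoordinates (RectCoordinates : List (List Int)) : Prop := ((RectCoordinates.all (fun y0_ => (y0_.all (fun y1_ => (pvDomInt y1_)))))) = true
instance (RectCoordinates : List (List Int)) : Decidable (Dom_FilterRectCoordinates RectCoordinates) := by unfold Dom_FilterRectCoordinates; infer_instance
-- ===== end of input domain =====

-- B replaces A's three-phase scheme (collect delete-indices, reverse them, delete by index)
-- with a single right-to-left pass carrying the following rectangle's sum (objective: simpler).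
-- Both A and B mutate the argument list in place in Python; the equivalence proved here is
-- about the returned value (which is that same list).

-- ===== PORT A =====
-- del RectCoordinates[i] is ported via PySem.List.pop?; the 'none' branch is unreachable
-- (every collected index is in range when it is deleted), keeping the list unchanged there.
def FilterRectCoordinates (RectCoordinates : List (List Int)) : List (List Int) :=
  let DeleteElementIndex : List Int :=
    (PySem.List.pyRange 1 (RectCoordinates.length : Int) 1).foldl (fun acc i =>
      let Sum1 := (PySem.List.pyGetD RectCoordinates (i - 1) []).foldl (fun s j => s + j) 0
      let Sum2 := (PySem.List.pyGetD RectCoordinates i []).foldl (fun s j => s + j) 0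
      let Difference := Sum1 - Sum2
      if -10 ≤ Difference ∧ Difference ≤ 10 then acc ++ [i - 1] else acc) []
  DeleteElementIndex.reverse.foldl (fun l i =>
      match PySem.List.pop? l i with
      | some (_, l') => l'
      | none => l) RectCoordinates

-- ===== PORT B =====
-- the loop body of Source B (append to kept depending on next_sum, then update next_sum)
def pvAltStep (st : List (List Int) × Option Int) (rect : List Int) : List (List Int) × Option Int :=
  let s := rect.sum
  let kept :=
    match st.2 with
    | none => st.1 ++ [rect]
    | some ns => if ¬ (-10 ≤ s - ns ∧ s - ns ≤ 10) then st.1 ++ [rect] else st.1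
  (kept, some s)

def FilterRectCoordinates_alt (RectCoordinates : List (List Int)) : List (List Int) :=
  let res := RectCoordinates.reverse.foldl pvAltStep ([], none)
  res.1.reverse

-- ===== PRECONDITION & SPEC =====
def Spec_FilterRectCoordinates (RectCoordinates : List (List Int)) (out : List (List Int)) : Prop := out = FilterRectCoordinates_alt RectCoordinates
instance (RectCoordinates : List (List Int)) (out : List (List Int)) : Decidable (Spec_FilterRectCoordinates RectCoordinates out) := by unfold Spec_FilterRectCoordinates; infer_instance

-- ===== CLAIM (what is proved, stated in full; the proofs are below) =====
def Claim_equal_FilterRectCoordinates : Prop := ∀ (RectCoordinates : List (List Int)), Dom_FilterRectCoordinates RectCoordinates → Spec_FilterRectCoordinates RectCoordinates (FilterRectCoordinates RectCoordinates)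

-- ===== LEMMAS AND PROOFS =====

-- sum as A's inner loops compute it
@[reducible] def pvSumL (l : List Int) : Int := l.foldl (fun s j => s + j) 0

-- reference recursion both ports are reduced to
def pvRef : List (List Int) → List (List Int)
  | [] => []
  | [x] => [x]
  | x :: y :: r =>
      if -10 ≤ pvSumL x - pvSumL y ∧ pvSumL x - pvSumL y ≤ 10 then pvRef (y :: r)
      else x :: pvRef (y :: r)

-- recursive characterisation of A's DeleteElementIndex list
def pvDrec : List (List Int) → List Int
  | [] => []
  | [_] => []
  | x :: y :: r =>
      (if -10 ≤ pvSumL x - pvSumL y ∧ pvSumL x - pvSumL y ≤ 10 then [0] else []) ++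
        (pvDrec (y :: r)).map (· + 1)

def pvDelStep (l : List (List Int)) (i : Int) : List (List Int) :=
  match PySem.List.pop? l i with
  | some (_, l') => l'
  | none => l

lemma pvSum_eq_pvSumL (l : List Int) : l.sum = pvSumL l := by
  simp [pvSumL, List.sum_eq_foldl]

lemma pvDrec_nonneg (xs : List (List Int)) : ∀ i ∈ pvDrec xs, 0 ≤ i := by
  induction xs using pvDrec.induct with
  | case1 => simp [pvDrec]
  | case2 _ => simp [pvDrec]
  | case3 x y r ih =>
    intro i hi
    simp only [pvDrec, List.mem_append, List.mem_map] at hi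
    rcases hi with h | ⟨j, hj, rfl⟩
    · split_ifs at h <;> simp at h; omega
    · have := ih j hj; omega

lemma pvPop_none {α : Type} (xs : List α) (i : Int) (h0 : 0 ≤ i)
    (h : (xs.length : Int) ≤ i) : PySem.List.pop? xs i = none := by
  simp only [PySem.List.pop?, PySem.List.pyIdx?, if_pos h0,
    if_neg (by omega : ¬ i < (xs.length : Int))]
  rfl

lemma pvDelStep_cons_succ (x : List Int) (l : List (List Int)) (i : Int) (hi : 0 ≤ i) :
    pvDelStep (x :: l) (i + 1) = x :: pvDelStep l i := by
  obtain ⟨k, rfl⟩ : ∃ k : ℕ, i = (k : Int) := ⟨i.toNat, by omega⟩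
  have hcast : ((k : Int) + 1) = ((k + 1 : ℕ) : Int) := by push_cast; ring
  by_cases hlen : k < l.length
  · rw [pvDelStep, pvDelStep, hcast,
      PySem.List.pop?_natCast _ _ (by simpa using Nat.succ_lt_succ hlen),
      PySem.List.pop?_natCast _ _ hlen]
    simp
  · rw [pvDelStep, pvDelStep, hcast,
      pvPop_none _ _ (by omega) (by simp; omega),
      pvPop_none _ _ (by omega) (by omega)]

lemma pvDelStep_zero_cons (x : List Int) (l : List (List Int)) :
    pvDelStep (x :: l) 0 = l := by
  simp [pvDelStep, PySem.List.pop?_zero_cons]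

lemma pvDel_map_succ (x : List Int) (l : List (List Int)) (is : List Int)
    (h : ∀ i ∈ is, 0 ≤ i) :
    (is.map (· + 1)).foldl pvDelStep (x :: l) = x :: is.foldl pvDelStep l := by
  induction is generalizing l with
  | nil => simp
  | cons a t ih =>
    simp only [List.map_cons, List.foldl_cons]
    rw [pvDelStep_cons_succ _ _ _ (h a (List.mem_cons_self))]
    exact ih _ (fun i hi => h i (List.mem_cons_of_mem _ hi))

lemma pvGetD_cons_shift (x : List Int) (ys : List (List Int)) (i : Int) (h : 0 ≤ i) :
    PySem.List.pyGetD (x :: ys) (i + 1) [] = PySem.List.pyGetD ys i [] := by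
  rw [PySem.List.pyGetD_of_nonneg _ _ (by omega), PySem.List.pyGetD_of_nonneg _ _ h]
  have hk : (i + 1).toNat = i.toNat + 1 := by omega
  rw [hk]
  rfl

lemma pvRange_shift (a b : Int) :
    PySem.List.pyRange (a + 1) (b + 1) 1 = (PySem.List.pyRange a b 1).map (· + 1) := by
  rw [PySem.List.pyRange_one, PySem.List.pyRange_one, List.map_map]
  have hd : (b + 1 - (a + 1)) = b - a := by ring
  rw [hd]
  exact List.map_congr_left (fun k _ => by simp; ring)

lemma pvMap_id (F : List Int) :
    List.map ((fun i => i - 1) ∘ fun x => x + 1) F = F := by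
  induction F with
  | nil => rfl
  | cons a t ih =>
    simp only [List.map_cons, ih, Function.comp_apply]
    congr 1
    omega

lemma pvMap_cancel1 (F : List Int) :
    List.map (fun i => i - 1) (F.map (fun i => i + 1)) = F := by
  induction F with
  | nil => rfl
  | cons a t ih => simp only [List.map_cons, ih]; norm_num

lemma pvMap_cancel2 (F : List Int) :
    List.map (fun i => i + 1) (F.map (fun i => i - 1)) = F := by
  induction F with
  | nil => rfl
  | cons a t ih => simp only [List.map_cons, ih]; norm_num

-- A's index-collection loop equals the recursive characterisation
lemma pvDelList_eq_pvDrec (xs : List (List Int)) :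
    (PySem.List.pyRange 1 (xs.length : Int) 1).foldl (fun acc i =>
      if -10 ≤ pvSumL (PySem.List.pyGetD xs (i - 1) []) - pvSumL (PySem.List.pyGetD xs i []) ∧
          pvSumL (PySem.List.pyGetD xs (i - 1) []) - pvSumL (PySem.List.pyGetD xs i []) ≤ 10
        then acc ++ [i - 1] else acc) [] = pvDrec xs := by
  induction xs using pvDrec.induct with
  | case1 => simp [pvDrec, PySem.List.pyRange_one_eq_nil]
  | case2 _ => simp [pvDrec, PySem.List.pyRange_one_eq_nil]
  | case3 x y r ih =>
    rw [PySem.List.foldl_append_ite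
      (fun i => -10 ≤ pvSumL (PySem.List.pyGetD (x :: y :: r) (i - 1) []) -
          pvSumL (PySem.List.pyGetD (x :: y :: r) i []) ∧
        pvSumL (PySem.List.pyGetD (x :: y :: r) (i - 1) []) -
          pvSumL (PySem.List.pyGetD (x :: y :: r) i []) ≤ 10) (fun i => i - 1)]
    rw [PySem.List.foldl_append_ite
      (fun i => -10 ≤ pvSumL (PySem.List.pyGetD (y :: r) (i - 1) []) -
          pvSumL (PySem.List.pyGetD (y :: r) i []) ∧
        pvSumL (PySem.List.pyGetD (y :: r) (i - 1) []) -
          pvSumL (PySem.List.pyGetD (y :: r) i []) ≤ 10) (fun i => i - 1)] at ih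
    simp only [List.nil_append] at ih ⊢
    have hlen : ((x :: y :: r).length : Int) = ((y :: r).length : Int) + 1 := by
      simp
    rw [hlen, PySem.List.pyRange_one_cons (by simp),
      show (1 : Int) + 1 = 1 + 1 from rfl,
      show PySem.List.pyRange (1 + 1) (((y :: r).length : Int) + 1) 1 =
          (PySem.List.pyRange 1 ((y :: r).length : Int) 1).map (· + 1) from pvRange_shift 1 _,
      List.filter_cons, List.filter_map]
    have hfc : List.filter ((fun i => decide
          (-10 ≤ pvSumL (PySem.List.pyGetD (x :: y :: r) (i - 1) []) -
              pvSumL (PySem.List.pyGetD (x :: y :: r) i []) ∧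
            pvSumL (PySem.List.pyGetD (x :: y :: r) (i - 1) []) -
              pvSumL (PySem.List.pyGetD (x :: y :: r) i []) ≤ 10)) ∘ (· + 1))
          (PySem.List.pyRange 1 ((y :: r).length : Int) 1) =
        List.filter (fun i => decide
          (-10 ≤ pvSumL (PySem.List.pyGetD (y :: r) (i - 1) []) -
              pvSumL (PySem.List.pyGetD (y :: r) i []) ∧
            pvSumL (PySem.List.pyGetD (y :: r) (i - 1) []) -
              pvSumL (PySem.List.pyGetD (y :: r) i []) ≤ 10))
          (PySem.List.pyRange 1 ((y :: r).length : Int) 1) := by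
      apply List.filter_congr
      intro i hi
      have hmem := (PySem.List.mem_pyRange_one).mp hi
      have h1 : i + 1 - 1 = (i - 1) + 1 := by ring
      simp only [Function.comp_apply, h1,
        pvGetD_cons_shift x (y :: r) (i - 1) (by omega),
        pvGetD_cons_shift x (y :: r) i (by omega)]
    rw [hfc]
    -- head test: indices 0 and 1 of x :: y :: r
    have hx0 : PySem.List.pyGetD (x :: y :: r) ((1 : Int) - 1) [] = x := by
      norm_num [PySem.List.pyGetD_zero_cons]
    have hy1 : PySem.List.pyGetD (x :: y :: r) (1 : Int) [] = y := by
      rw [show (1 : Int) = (0 : Int) + 1 from rfl, pvGetD_cons_shift x (y :: r) 0 le_rfl,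
        PySem.List.pyGetD_zero_cons]
    rw [pvDrec, ← ih]
    simp only [hx0, hy1]
    by_cases hc : -10 ≤ pvSumL x - pvSumL y ∧ pvSumL x - pvSumL y ≤ 10
    · simp only [hc, pvMap_cancel2]
      norm_num
      exact pvMap_id _
    · simp only [hc, decide_false, Bool.false_eq_true, if_false, List.nil_append,
        pvMap_cancel1, pvMap_cancel2]

lemma pvA_eq_drec (xs : List (List Int)) :
    FilterRectCoordinates xs = (pvDrec xs).reverse.foldl pvDelStep xs := by
  unfold FilterRectCoordinates
  simp only []
  rw [show (fun (l : List (List Int)) (i : Int) =>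
      match PySem.List.pop? l i with
      | some (_, l') => l'
      | none => l) = pvDelStep from rfl]
  congr 1
  exact congrArg List.reverse (pvDelList_eq_pvDrec xs)

lemma pvDel_ref (xs : List (List Int)) :
    (pvDrec xs).reverse.foldl pvDelStep xs = pvRef xs := by
  induction xs using pvDrec.induct with
  | case1 => simp [pvDrec, pvRef]
  | case2 _ => simp [pvDrec, pvRef]
  | case3 x y r ih =>
    rw [pvDrec, List.reverse_append, List.foldl_append, ← List.map_reverse,
      pvDel_map_succ x (y :: r) (pvDrec (y :: r)).reverse
        (fun i hi => pvDrec_nonneg _ i (List.mem_reverse.mp hi)),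
      ih]
    by_cases hc : -10 ≤ pvSumL x - pvSumL y ∧ pvSumL x - pvSumL y ≤ 10
    · rw [if_pos hc]
      simp only [List.reverse_cons, List.reverse_nil, List.nil_append, List.foldl_cons,
        List.foldl_nil, pvDelStep_zero_cons]
      rw [pvRef, if_pos hc]
    · rw [if_neg hc]
      simp only [List.reverse_nil, List.foldl_nil]
      rw [pvRef, if_neg hc]

lemma pvA_eq_ref (xs : List (List Int)) : FilterRectCoordinates xs = pvRef xs := by
  rw [pvA_eq_drec, pvDel_ref]

lemma pvB_fold (xs : List (List Int)) (hx : xs ≠ []) :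
    xs.foldr (fun rect st => pvAltStep st rect) ([], none) =
      ((pvRef xs).reverse, some (pvSumL xs.head!)) := by
  induction xs using pvDrec.induct with
  | case1 => exact absurd rfl hx
  | case2 z => simp [pvAltStep, pvRef, pvSum_eq_pvSumL, List.head!]
  | case3 x y r ih =>
    rw [List.foldr_cons, ih (by simp)]
    simp only [pvAltStep, pvSum_eq_pvSumL]
    have hh : (y :: r).head! = y := rfl
    rw [hh, pvRef]
    by_cases hc : -10 ≤ pvSumL x - pvSumL y ∧ pvSumL x - pvSumL y ≤ 10
    · rw [if_neg (not_not_intro hc), if_pos hc]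
      rfl
    · rw [if_pos hc, if_neg hc, List.reverse_cons]
      rfl

lemma pvB_eq_ref (xs : List (List Int)) : FilterRectCoordinates_alt xs = pvRef xs := by
  cases xs with
  | nil => rfl
  | cons x r =>
    unfold FilterRectCoordinates_alt
    rw [List.foldl_reverse, pvB_fold (x :: r) (by simp)]
    simp

-- ===== VERDICT (by name: the statement is the Claim_ definition above) =====
theorem FilterRectCoordinates_spec : Claim_equal_FilterRectCoordinates := by
  intro xs _
  unfold Spec_FilterRectCoordinates
  rw [pvA_eq_ref, pvB_eq_ref]
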